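-- pv_equiv track=rewrite | github.com/MrWhoCoded/wordle_clone | wordle_automation.py | word_difficulty
-- ===== SOURCE A (Python) =====
-- def word_difficulty(common_words, dif_lvl):
--     words_per_lvl = int(len(common_words)/5)
--
--     #gives range of words from most difficult to the easiest.
--     count=1#to count which level for loop is on
--     for lvl in range(5):
--         lst_dif = common_words[lvl:(lvl+1)*words_per_lvl]
--
--         if count == dif_lvl:
--             return list(lst_dif)
--         else:
--             count +=1
-- ===== SOURCE B (Python) =====
-- def word_difficulty(common_words, dif_lvl):
--     # closed form: level k (1..5) gets the slice [k-1 : k*words_per_lvl]; anything else -> None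
--     if dif_lvl in (1, 2, 3, 4, 5):
--         words_per_lvl = len(common_words) // 5
--         return common_words[dif_lvl - 1 : dif_lvl * words_per_lvl]
--     return None
-- ===== Notes on version B (the rewrite author's own statement) =====
-- stated objective: simpler
-- what changed: Replaces the range(5) loop with its counter by a direct membership test on dif_lvl and one closed-form slice [dif_lvl-1 : dif_lvl*words_per_lvl].
import Mathlib
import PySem

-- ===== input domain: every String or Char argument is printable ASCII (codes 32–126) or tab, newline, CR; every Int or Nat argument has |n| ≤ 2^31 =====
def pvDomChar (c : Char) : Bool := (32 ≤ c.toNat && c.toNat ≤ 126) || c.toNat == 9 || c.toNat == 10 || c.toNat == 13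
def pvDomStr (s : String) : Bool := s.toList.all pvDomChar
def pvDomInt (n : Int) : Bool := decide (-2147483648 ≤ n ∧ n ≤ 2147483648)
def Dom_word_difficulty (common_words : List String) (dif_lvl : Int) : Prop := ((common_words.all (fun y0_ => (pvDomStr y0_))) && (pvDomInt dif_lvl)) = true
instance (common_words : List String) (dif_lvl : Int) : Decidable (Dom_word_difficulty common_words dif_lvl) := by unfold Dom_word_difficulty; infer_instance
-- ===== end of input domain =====

-- B replaces A's range(5) loop and counter by one membership test and a closed-form slice (objective: simpler).

-- ===== PORT A =====
-- the 'for lvl in range(5)' loop with its 'count' accumulator and early return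
def wdLoopA (common_words : List String) (dif_lvl : Int) (words_per_lvl : Int) :
    List Int → Int → Option (List String)
  | [], _ => none
  | lvl :: rest, count =>
    let lst_dif := PySem.List.slice common_words (some lvl) (some ((lvl + 1) * words_per_lvl))
    if count == dif_lvl then some lst_dif
    else wdLoopA common_words dif_lvl words_per_lvl rest (count + 1)

def word_difficulty (common_words : List String) (dif_lvl : Int) : Option (List String) :=
  -- int(len(cw)/5): length is nonnegative, so float truncation equals floor division
  let words_per_lvl := PySem.Int.floordiv (common_words.length : Int) 5
  wdLoopA common_words dif_lvl words_per_lvl (PySem.List.pyRange 0 5 1) 1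

-- ===== PORT B =====
def word_difficulty_alt (common_words : List String) (dif_lvl : Int) : Option (List String) :=
  if dif_lvl = 1 ∨ dif_lvl = 2 ∨ dif_lvl = 3 ∨ dif_lvl = 4 ∨ dif_lvl = 5 then
    let words_per_lvl := PySem.Int.floordiv (common_words.length : Int) 5
    some (PySem.List.slice common_words (some (dif_lvl - 1)) (some (dif_lvl * words_per_lvl)))
  else none

-- ===== PRECONDITION & SPEC =====
def Spec_word_difficulty (common_words : List String) (dif_lvl : Int) (out : Option (List String)) : Prop := out = word_difficulty_alt common_words dif_lvl
instance (common_words : List String) (dif_lvl : Int) (out : Option (List String)) : Decidable (Spec_word_difficulty common_words dif_lvl out) := by unfold Spec_word_difficulty; infer_instance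

-- ===== CLAIM (what is proved, stated in full; the proofs are below) =====
def Claim_equal_word_difficulty : Prop := ∀ (common_words : List String) (dif_lvl : Int), Dom_word_difficulty common_words dif_lvl → Spec_word_difficulty common_words dif_lvl (word_difficulty common_words dif_lvl)

-- ===== LEMMAS AND PROOFS =====

theorem pyRange_0_5 : PySem.List.pyRange 0 5 1 = [0, 1, 2, 3, 4] := by decide

-- ===== VERDICT (by name: the statement is the Claim_ definition above) =====
theorem word_difficulty_spec : Claim_equal_word_difficulty := by
  intro cw dl _
  unfold Spec_word_difficulty word_difficulty word_difficulty_alt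
  rw [pyRange_0_5]
  by_cases h1 : dl = 1
  · subst h1; norm_num [wdLoopA]
  by_cases h2 : dl = 2
  · subst h2; norm_num [wdLoopA]
  by_cases h3 : dl = 3
  · subst h3; norm_num [wdLoopA]
  by_cases h4 : dl = 4
  · subst h4; norm_num [wdLoopA]
  by_cases h5 : dl = 5
  · subst h5; norm_num [wdLoopA]
  · have hne : ¬ (dl = 1 ∨ dl = 2 ∨ dl = 3 ∨ dl = 4 ∨ dl = 5) := by tauto
    have e1 : (1 : Int) ≠ dl := fun h => h1 h.symm
    have e2 : (2 : Int) ≠ dl := fun h => h2 h.symm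
    have e3 : (3 : Int) ≠ dl := fun h => h3 h.symm
    have e4 : (4 : Int) ≠ dl := fun h => h4 h.symm
    have e5 : (5 : Int) ≠ dl := fun h => h5 h.symm
    simp [wdLoopA, e1, e2, e3, e4, e5, hne]
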